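-- pv_equiv track=rewrite | github.com/luthfy13/Sentiment-Analysis-with-Chi-Squared | svm_evaluasi.py | get_list_index
-- ===== SOURCE A (Python) =====
-- def get_list_index(K):
-- 	list_indexes = []
-- 	for i in range(0, K):
-- 		x=0
-- 		list_index = []
-- 		for j in range(i, K):
-- 			list_index.append(j)
-- 			x += 1
-- 		if x < K:
-- 			for y in range(0, K-x):
-- 				list_index.append(y)
-- 		list_indexes.append(list_index)
-- 	return list_indexes
-- ===== SOURCE B (Python) =====
-- def get_list_index(K):
--     return [[(i + j) % K for j in range(K)] for i in range(K)]
-- ===== Notes on version B (the rewrite author's own statement) =====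
-- stated objective: simpler
-- what changed: Replaced the two sequential inner append loops with the wrap-around guard by a single closed-form element formula (i+j) % K computed in a double comprehension.
import Mathlib
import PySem

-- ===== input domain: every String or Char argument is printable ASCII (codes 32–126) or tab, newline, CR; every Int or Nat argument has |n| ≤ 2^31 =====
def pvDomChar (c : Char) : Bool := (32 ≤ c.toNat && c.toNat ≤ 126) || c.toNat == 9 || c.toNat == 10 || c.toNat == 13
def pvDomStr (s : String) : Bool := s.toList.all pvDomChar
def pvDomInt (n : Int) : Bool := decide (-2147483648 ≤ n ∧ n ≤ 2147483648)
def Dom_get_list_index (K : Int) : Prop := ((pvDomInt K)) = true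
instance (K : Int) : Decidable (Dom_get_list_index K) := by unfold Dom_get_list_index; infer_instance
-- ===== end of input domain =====

-- B replaces A's two sequential inner append loops and wrap guard with the closed-form element (i+j) % K (objective: simpler).

-- ===== PORT A =====
def get_list_index (K : Int) : List (List Int) :=
  (PySem.List.pyRange 0 K 1).foldl (fun list_indexes i =>
    -- x = 0; list_index = []; for j in range(i, K): list_index.append(j); x += 1
    let st := (PySem.List.pyRange i K 1).foldl
      (fun (p : Int × List Int) j => (p.1 + 1, p.2 ++ [j])) ((0 : Int), ([] : List Int))
    -- if x < K: for y in range(0, K-x): list_index.append(y)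
    let list_index := if st.1 < K then
        (PySem.List.pyRange 0 (K - st.1) 1).foldl (fun l y => l ++ [y]) st.2
      else st.2
    list_indexes ++ [list_index]) []

-- ===== PORT B =====
def get_list_index_alt (K : Int) : List (List Int) :=
  (PySem.List.pyRange 0 K 1).map (fun i =>
    (PySem.List.pyRange 0 K 1).map (fun j => PySem.Int.mod (i + j) K))

-- ===== PRECONDITION & SPEC =====
def Spec_get_list_index (K : Int) (out : List (List Int)) : Prop := out = get_list_index_alt K
instance (K : Int) (out : List (List Int)) : Decidable (Spec_get_list_index K out) := by unfold Spec_get_list_index; infer_instance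

-- ===== CLAIM (what is proved, stated in full; the proofs are below) =====
def Claim_equal_get_list_index : Prop := ∀ (K : Int), Dom_get_list_index K → Spec_get_list_index K (get_list_index K)

-- ===== LEMMAS AND PROOFS =====

-- A's inner j-loop: counts the elements it appends
lemma pv_inner_fold (l : List Int) (x0 : Int) (l0 : List Int) :
    l.foldl (fun (p : Int × List Int) j => (p.1 + 1, p.2 ++ [j])) (x0, l0)
      = (x0 + l.length, l0 ++ l) := by
  induction l generalizing x0 l0 with
  | nil => simp
  | cons a t ih => simp only [List.foldl_cons, ih, List.length_cons]
                   refine Prod.ext ?_ ?_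
                   · simp; omega
                   · simp

-- A's rotated row [i..K-1] ++ [0..i-1] equals B's modular row
lemma pv_row_eq (K i : Int) (h0 : 0 ≤ i) (h1 : i < K) :
    PySem.List.pyRange i K 1 ++ PySem.List.pyRange 0 i 1
      = (PySem.List.pyRange 0 K 1).map (fun j => PySem.Int.mod (i + j) K) := by
  apply List.ext_getElem
  · simp [PySem.List.length_pyRange_one]; omega
  · intro n hn hm
    simp only [List.length_append, PySem.List.length_pyRange_one] at hn
    rw [List.getElem_map, PySem.List.getElem_pyRange_one]
    rw [PySem.Int.mod_eq_emod_of_pos (by omega)]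
    by_cases hc : n < (K - i).toNat
    · rw [List.getElem_append_left (by simpa [PySem.List.length_pyRange_one] using hc)]
      rw [PySem.List.getElem_pyRange_one]
      rw [Int.emod_eq_of_lt (by omega) (by omega)]
      ring
    · rw [List.getElem_append_right (by simpa [PySem.List.length_pyRange_one] using hc)]
      rw [PySem.List.getElem_pyRange_one]
      have : (i + (0 + ↑n)) % K = (i + (0 + ↑n) - K) % K := (Int.sub_emod_right _ _).symm
      rw [this, Int.emod_eq_of_lt (by omega) (by omega)]
      simp [PySem.List.length_pyRange_one]
      omega

-- ===== VERDICT (by name: the statement is the Claim_ definition above) =====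
theorem get_list_index_spec : Claim_equal_get_list_index := by
  intro K _
  unfold Spec_get_list_index get_list_index get_list_index_alt
  rw [PySem.List.foldl_append_singleton_eq_map, List.nil_append]
  apply List.map_congr_left
  intro i hi
  rw [PySem.List.mem_pyRange_one] at hi
  rw [pv_inner_fold, PySem.List.foldl_append_singleton]
  simp only [PySem.List.length_pyRange_one, zero_add]
  have hx : ((K - i).toNat : Int) = K - i := by omega
  rw [hx]
  by_cases hz : i = 0
  · subst hz
    rw [if_neg (by omega)]
    simpa using pv_row_eq K 0 le_rfl hi.2
  · rw [if_pos (by omega)]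
    have h2 : K - (K - i) = i := by ring
    rw [h2, List.nil_append]
    exact pv_row_eq K i hi.1 hi.2
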